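-- pv_equiv track=rewrite | github.com/NGWi/deliberate-practice2 | binaryHashSort.py | expandTree
-- ===== SOURCE A (Python) =====
-- def expandTree(tree: set, layers: int) -> list:
--     """
--     We expand the layers one at a time (breadth-first). The nodes are inherently ordered by 0, 1.
--     """
--     parent_layer = [""]
--     for i in range(layers):
--         child_layer = []
--         for parent in parent_layer:
--             for child in (parent + "0", parent + "1"):
--                 if child in tree:
--                     child_layer.append(child)
--         parent_layer = child_layer  # Can skip last one and do while True with if i < layer. See below
--
--     return parent_layer
-- ===== SOURCE B (Python) =====
-- def expandTree(tree: set, layers: int) -> list: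
--     """Depth-first: recursively expand each prefix, 0-child before 1-child."""
--     def expand(prefix, depth):
--         if depth >= layers:
--             return [prefix]
--         result = []
--         child0 = prefix + "0"
--         if child0 in tree:
--             result += expand(child0, depth + 1)
--         child1 = prefix + "1"
--         if child1 in tree:
--             result += expand(child1, depth + 1)
--         return result
--     return expand("", 0)
-- ===== Notes on version B (the rewrite author's own statement) =====
-- stated objective: alternative
-- what changed: Replaces the breadth-first layer-by-layer frontier loop with a recursive depth-first expansion that emits each surviving prefix's subtree (0-child before 1-child); the recursion stops as soon as a prefix has no surviving children, whereas A iterates through all remaining layers with an empty frontier.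
import Mathlib
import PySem

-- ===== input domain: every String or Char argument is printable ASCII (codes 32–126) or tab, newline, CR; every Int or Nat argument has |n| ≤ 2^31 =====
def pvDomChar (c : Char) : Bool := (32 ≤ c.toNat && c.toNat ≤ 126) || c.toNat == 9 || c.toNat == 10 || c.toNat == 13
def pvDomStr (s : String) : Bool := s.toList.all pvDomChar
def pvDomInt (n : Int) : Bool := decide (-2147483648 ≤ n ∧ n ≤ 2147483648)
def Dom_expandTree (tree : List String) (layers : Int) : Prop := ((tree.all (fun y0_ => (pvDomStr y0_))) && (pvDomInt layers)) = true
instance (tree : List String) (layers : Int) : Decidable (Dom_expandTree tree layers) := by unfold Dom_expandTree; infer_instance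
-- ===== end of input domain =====

-- B replaces A's breadth-first layer loop by a recursive depth-first expansion; alternative decomposition, same results.


-- ===== PORT A =====
-- for i in range(layers): build child_layer by scanning parent_layer, appending each surviving child
def expandTree (tree : List String) (layers : Int) : List String :=
  (PySem.List.pyRange 0 layers 1).foldl
    (fun parent_layer _ =>
      parent_layer.foldl
        (fun child_layer parent =>
          let cl0 := if tree.contains (parent ++ "0") then child_layer ++ [parent ++ "0"] else child_layer
          if tree.contains (parent ++ "1") then cl0 ++ [parent ++ "1"] else cl0)
        [])
    [""]

-- ===== PORT B =====
-- expand(pre, depth): recursion on the remaining depth (layers - depth), counted down as a Nat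
def expandAux (tree : List String) : Nat → String → List String
  | 0, pre => [pre]
  | n + 1, pre =>
      (if tree.contains (pre ++ "0") then expandAux tree n (pre ++ "0") else []) ++
      (if tree.contains (pre ++ "1") then expandAux tree n (pre ++ "1") else [])

def expandTree_alt (tree : List String) (layers : Int) : List String :=
  expandAux tree layers.toNat ""

-- ===== PRECONDITION & SPEC =====
def Spec_expandTree (tree : List String) (layers : Int) (out : List String) : Prop := out = expandTree_alt tree layers
instance (tree : List String) (layers : Int) (out : List String) : Decidable (Spec_expandTree tree layers out) := by unfold Spec_expandTree; infer_instance

-- ===== CLAIM (what is proved, stated in full; the proofs are below) =====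
def Claim_equal_expandTree : Prop := ∀ (tree : List String) (layers : Int), Dom_expandTree tree layers → Spec_expandTree tree layers (expandTree tree layers)

-- ===== LEMMAS AND PROOFS =====

-- one BFS step: the surviving children of every parent, in order
def stepChildren (tree : List String) (L : List String) : List String :=
  L.foldl
    (fun child_layer parent =>
      let cl0 := if tree.contains (parent ++ "0") then child_layer ++ [parent ++ "0"] else child_layer
      if tree.contains (parent ++ "1") then cl0 ++ [parent ++ "1"] else cl0)
    []

def childList (tree : List String) (p : String) : List String :=
  (if tree.contains (p ++ "0") then [p ++ "0"] else []) ++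
  (if tree.contains (p ++ "1") then [p ++ "1"] else [])

theorem stepChildren_aux (tree : List String) (L : List String) (acc : List String) :
    L.foldl
      (fun child_layer parent =>
        let cl0 := if tree.contains (parent ++ "0") then child_layer ++ [parent ++ "0"] else child_layer
        if tree.contains (parent ++ "1") then cl0 ++ [parent ++ "1"] else cl0)
      acc = acc ++ L.flatMap (childList tree) := by
  induction L generalizing acc with
  | nil => simp
  | cons p L ih =>
      simp only [List.foldl_cons, List.flatMap_cons, ih, childList]
      split_ifs <;> simp

theorem stepChildren_eq (tree : List String) (L : List String) :
    stepChildren tree L = L.flatMap (childList tree) := by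
  simpa [stepChildren] using stepChildren_aux tree L []

-- n BFS steps from frontier L = concatenating the n-deep DFS expansions of its members
theorem iterate_step_eq_flatMap (tree : List String) :
    ∀ (n : Nat) (L : List String),
      (stepChildren tree)^[n] L = L.flatMap (expandAux tree n) := by
  intro n
  induction n with
  | zero => intro L; simp [expandAux]
  | succ n ih =>
      intro L
      rw [Function.iterate_succ_apply, ih, stepChildren_eq, List.flatMap_assoc]
      congr 1
      funext p
      simp only [childList, expandAux]
      split_ifs <;> simp

-- a fold that ignores the list elements is an iterate of the length
theorem foldl_const_iterate {α β : Type} (f : β → β) :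
    ∀ (l : List α) (s : β), l.foldl (fun st _ => f st) s = f^[l.length] s := by
  intro l
  induction l with
  | nil => intro s; simp
  | cons a l ih => intro s; simp [ih, Function.iterate_succ_apply]

-- ===== VERDICT (by name: the statement is the Claim_ definition above) =====
theorem expandTree_spec : Claim_equal_expandTree := by
  intro tree layers _
  show expandTree tree layers = expandTree_alt tree layers
  have h : expandTree tree layers =
      (PySem.List.pyRange 0 layers 1).foldl (fun st _ => stepChildren tree st) [""] := rfl
  rw [h, foldl_const_iterate, iterate_step_eq_flatMap, PySem.List.length_pyRange_one]
  simp [expandTree_alt]
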